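-- pv_equiv track=rewrite | github.com/BUACHI-EMPIRE/sms-broadcasting-app | utils.py | parse_phone_numbers_from_input
-- ===== SOURCE A (Python) =====
-- def parse_phone_numbers_from_input(phone_numbers_input):
--     """Parse phone numbers from manual input - handles multiple numbers separated by commas or newlines"""
--     if not phone_numbers_input or not isinstance(phone_numbers_input, str):
--         return []
--
--     # Split by commas and newlines
--     numbers = []
--     for line in phone_numbers_input.split('\n'):
--         for number in line.split(','):
--             number = number.strip()
--             if number:
--                 numbers.append(number)
--
--     return numbers
-- ===== SOURCE B (Python) =====
-- def parse_phone_numbers_from_input(phone_numbers_input):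
--     """Parse phone numbers from manual input - handles multiple numbers separated by commas or newlines"""
--     if not phone_numbers_input or not isinstance(phone_numbers_input, str):
--         return []
--     # Single character scan: build each token in a buffer, skipping leading
--     # whitespace and remembering how many trailing whitespace chars to drop;
--     # flush the buffer at each delimiter and at the end.
--     numbers = []
--     buf = []        # chars of the current token, leading whitespace never enters
--     trail = 0       # count of whitespace chars currently at the end of buf
--     for ch in phone_numbers_input:
--         if ch == ',' or ch == '\n':
--             if len(buf) > trail:
--                 numbers.append(''.join(buf[:len(buf) - trail]))
--             buf = []
--             trail = 0
--         elif ch.isspace():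
--             if buf:
--                 buf.append(ch)
--                 trail += 1
--         else:
--             buf.append(ch)
--             trail = 0
--     if len(buf) > trail:
--         numbers.append(''.join(buf[:len(buf) - trail]))
--     return numbers
-- ===== Notes on version B (the rewrite author's own statement) =====
-- stated objective: alternative
-- what changed: Replaces A's split-by-newline, split-by-comma, strip pipeline with a single character-scan tokenizer that builds each token in a buffer, skips leading whitespace and tracks a trailing-whitespace count, flushing at each delimiter and at the end.
import Mathlib
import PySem

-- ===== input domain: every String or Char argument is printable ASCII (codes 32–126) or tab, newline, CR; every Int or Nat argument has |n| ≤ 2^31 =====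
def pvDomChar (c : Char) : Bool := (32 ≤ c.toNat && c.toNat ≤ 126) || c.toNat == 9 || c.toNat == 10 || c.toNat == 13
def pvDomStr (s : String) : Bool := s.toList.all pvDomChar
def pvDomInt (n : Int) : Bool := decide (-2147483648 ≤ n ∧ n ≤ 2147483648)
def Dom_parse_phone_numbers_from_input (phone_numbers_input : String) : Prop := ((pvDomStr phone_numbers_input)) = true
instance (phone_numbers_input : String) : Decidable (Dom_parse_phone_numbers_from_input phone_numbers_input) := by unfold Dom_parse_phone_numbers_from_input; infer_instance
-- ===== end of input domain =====

-- B replaces A's split/strip pipeline by a single character-scan tokenizer (buffer + trailing-whitespace counter); objective: alternative decomposition.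

-- ===== PORT A =====
def parse_phone_numbers_from_input (phone_numbers_input : String) : List String :=
  if phone_numbers_input = "" then []
  else
    ((PySem.Str.split? phone_numbers_input "\n").getD []).foldl
      (fun numbers line =>
        ((PySem.Str.split? line ",").getD []).foldl
          (fun numbers number =>
            let number := PySem.Str.strip number
            if number ≠ "" then numbers ++ [number] else numbers)
          numbers)
      []

-- ===== PORT B =====
-- literal port of Source B's character scan: buf holds the current token's chars
-- (leading whitespace never enters), trail counts whitespace at the end of buf.
def pvAltLoop (numbers : List String) (buf : List Char) (trail : Nat) : List Char → List String
  | [] =>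
      if buf.length > trail then numbers ++ [String.ofList (buf.take (buf.length - trail))]
      else numbers
  | ch :: rest =>
      if ch = ',' ∨ ch = '\n' then
        pvAltLoop
          (if buf.length > trail then numbers ++ [String.ofList (buf.take (buf.length - trail))]
           else numbers) [] 0 rest
      else if PySem.Chars.isspace ch then
        if buf ≠ [] then pvAltLoop numbers (buf ++ [ch]) (trail + 1) rest
        else pvAltLoop numbers buf trail rest
      else pvAltLoop numbers (buf ++ [ch]) 0 rest

def parse_phone_numbers_from_input_alt (phone_numbers_input : String) : List String :=
  if phone_numbers_input = "" then []
  else pvAltLoop [] [] 0 phone_numbers_input.toList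

-- ===== PRECONDITION & SPEC =====
def Spec_parse_phone_numbers_from_input (phone_numbers_input : String) (out : List String) : Prop := out = parse_phone_numbers_from_input_alt phone_numbers_input
instance (phone_numbers_input : String) (out : List String) : Decidable (Spec_parse_phone_numbers_from_input phone_numbers_input out) := by unfold Spec_parse_phone_numbers_from_input; infer_instance

-- ===== CLAIM (what is proved, stated in full; the proofs are below) =====
def Claim_equal_parse_phone_numbers_from_input : Prop := ∀ (phone_numbers_input : String), Dom_parse_phone_numbers_from_input phone_numbers_input → Spec_parse_phone_numbers_from_input phone_numbers_input (parse_phone_numbers_from_input phone_numbers_input)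

-- ===== LEMMAS AND PROOFS =====

-- pvSplit c s is Python s.split(c) for a single-character separator, by structural recursion.
def pvSplit (c : Char) : List Char → List (List Char)
  | [] => [[]]
  | a :: t => if a = c then [] :: pvSplit c t else (pvSplit c t).modifyHead (a :: ·)

-- pvSplit2 splits on both delimiters at once.
def pvSplit2 : List Char → List (List Char)
  | [] => [[]]
  | a :: t => if a = ',' ∨ a = '\n' then [] :: pvSplit2 t else (pvSplit2 t).modifyHead (a :: ·)

-- emit: strip each piece, keep the non-empty results.
def pvEmit (ps : List (List Char)) : List String :=
  ps.flatMap (fun cs =>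
    if PySem.Chars.strip cs = [] then [] else [String.ofList (PySem.Chars.strip cs)])

def pvWsSuf (b : List Char) : Nat := (b.reverse.takeWhile PySem.Chars.isspace).length

theorem pvSplit_ne_nil (c : Char) (l : List Char) : pvSplit c l ≠ [] := by
  induction l with
  | nil => simp [pvSplit]
  | cons a t ih =>
    simp only [pvSplit]
    split
    · simp
    · cases h : pvSplit c t with
      | nil => exact absurd h ih
      | cons x xs => simp

theorem pvSplit2_ne_nil (l : List Char) : pvSplit2 l ≠ [] := by
  induction l with
  | nil => simp [pvSplit2]
  | cons a t ih =>
    simp only [pvSplit2]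
    split
    · simp
    · cases h : pvSplit2 t with
      | nil => exact absurd h ih
      | cons x xs => simp

theorem pv_modifyHead_id {α : Type} (l : List α) : List.modifyHead (fun x => x) l = l := by
  cases l <;> simp

theorem go_spec (c : Char) (fuel : Nat) (l cur : List Char) (acc : List (List Char))
    (h : l.length ≤ fuel) :
    PySem.Chars.splitOn.go [c] fuel l cur acc
      = acc.reverse ++ (pvSplit c l).modifyHead (cur.reverse ++ ·) := by
  induction fuel generalizing l cur acc with
  | zero =>
    have : l = [] := by cases l <;> simp_all
    subst this
    simp [PySem.Chars.splitOn.go, pvSplit]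
  | succ n ih =>
    cases l with
    | nil => simp [PySem.Chars.splitOn.go, pvSplit]
    | cons a t =>
      simp only [PySem.Chars.splitOn.go]
      by_cases hac : a = c
      · subst hac
        rw [if_pos (by simp [List.isPrefixOf])]
        simp only [List.length_cons, List.length_nil, List.drop_succ_cons, List.drop_zero]
        rw [ih t [] _ (by simpa using Nat.le_of_succ_le_succ h)]
        simp [pvSplit, pv_modifyHead_id]
      · rw [if_neg (by simp [List.isPrefixOf, Ne.symm hac])]
        rw [ih t (a :: cur) acc (by simpa using Nat.le_of_succ_le_succ h)]
        simp only [pvSplit, if_neg hac]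
        cases hs : pvSplit c t with
        | nil => exact absurd hs (pvSplit_ne_nil c t)
        | cons x xs => simp

theorem splitOn_single (c : Char) (s : List Char) :
    PySem.Chars.splitOn s [c] = pvSplit c s := by
  rw [PySem.Chars.splitOn, go_spec c _ s [] [] (by omega)]
  cases h : pvSplit c s with
  | nil => exact absurd h (pvSplit_ne_nil c s)
  | cons x xs => simp

-- splitting on '\n' then on ',' is the simultaneous split
theorem pvSplit2_eq_flatMap (l : List Char) :
    pvSplit2 l = (pvSplit '\n' l).flatMap (pvSplit ',') := by
  induction l with
  | nil => simp [pvSplit, pvSplit2]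
  | cons a t ih =>
    by_cases h1 : a = '\n'
    · subst h1
      simp only [pvSplit2, pvSplit]
      rw [ih]
      simp [pvSplit]
    · by_cases h2 : a = ','
      · subst h2
        simp only [pvSplit2, pvSplit, if_neg h1]
        rw [ih]
        cases hs : pvSplit '\n' t with
        | nil => exact absurd hs (pvSplit_ne_nil _ _)
        | cons x xs => simp [pvSplit]
      · have hno : ¬(a = ',' ∨ a = '\n') := by tauto
        simp only [pvSplit2, pvSplit, if_neg hno, if_neg h1]
        rw [ih]
        cases hs : pvSplit '\n' t with
        | nil => exact absurd hs (pvSplit_ne_nil _ _)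
        | cons x xs =>
          cases hx : pvSplit ',' x with
          | nil => exact absurd hx (pvSplit_ne_nil _ _)
          | cons y ys => simp [pvSplit, hx, if_neg h2]

theorem pv_ofList_eq_empty (q : List Char) : (String.ofList q = "") ↔ q = [] := by
  constructor
  · intro h; have := congrArg String.toList h; simpa using this
  · intro h; subst h; rfl

theorem pv_foldl_strip (l : List String) (acc : List String) :
    l.foldl (fun acc x => if PySem.Str.strip x = "" then acc
                          else acc ++ [PySem.Str.strip x]) acc
      = acc ++ ((l.map PySem.Str.strip).filter (fun t => t ≠ "")) := by
  induction l generalizing acc with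
  | nil => simp
  | cons x t ih =>
    simp only [List.foldl_cons, List.map_cons, List.filter_cons]
    by_cases hx : PySem.Str.strip x = ""
    · simp [hx, ih]
    · simp [hx, ih]

theorem pvEmit_eq_filter (qs : List (List Char)) :
    pvEmit qs
      = ((qs.map (fun q => String.ofList (PySem.Chars.strip q))).filter (fun t => t ≠ "")) := by
  induction qs with
  | nil => simp [pvEmit]
  | cons q t ih =>
    simp only [pvEmit, List.flatMap_cons, List.map_cons, List.filter_cons]
    by_cases hq : PySem.Chars.strip q = []
    · simp [hq, pvEmit] at *
      simpa [hq] using ih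
    · have : ¬ (String.ofList (PySem.Chars.strip q) = "") := by
        simpa [pv_ofList_eq_empty] using hq
      simp only [if_neg hq, ne_eq, this, not_false_eq_true, decide_true, List.singleton_append]
      rw [← ih]; rfl

theorem pvEmit_flatMap (L : List (List Char)) (g : List Char → List (List Char)) :
    pvEmit (L.flatMap g) = L.flatMap (fun p => pvEmit (g p)) := by
  simp [pvEmit, List.flatMap_assoc]

-- ===== whitespace-buffer bookkeeping for the scan =====

theorem pv_take_sub {α : Type} (X Y : List α) :
    (X ++ Y).take ((X ++ Y).length - Y.length) = X := by
  have h : (X ++ Y).length - Y.length = X.length := by simp [List.length_append]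
  rw [h, List.take_left]

theorem pv_modifyHead_nil_append {α : Type} (l : List (List α)) :
    List.modifyHead (fun x => [] ++ x) l = l := by
  cases l <;> simp

theorem pv_flush_eq (b : List Char) :
    b.take (b.length - pvWsSuf b) = PySem.Chars.rstrip b := by
  have hsplit : (b.reverse.dropWhile PySem.Chars.isspace).reverse
      ++ (b.reverse.takeWhile PySem.Chars.isspace).reverse = b := by
    rw [← List.reverse_append, List.takeWhile_append_dropWhile, List.reverse_reverse]
  have hlen : (b.reverse.dropWhile PySem.Chars.isspace).reverse.length
      = b.length - pvWsSuf b := by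
    have := congrArg List.length hsplit
    simp only [List.length_append, List.length_reverse] at this
    simp only [pvWsSuf, List.length_reverse]
    omega
  have h := pv_take_sub (X := (b.reverse.dropWhile PySem.Chars.isspace).reverse)
    (Y := (b.reverse.takeWhile PySem.Chars.isspace).reverse)
  rw [hsplit] at h
  have hY : (b.reverse.takeWhile PySem.Chars.isspace).reverse.length = pvWsSuf b := by
    simp [pvWsSuf]
  rw [hY] at h
  rw [h]
  rfl

theorem pv_flush_pos (b : List Char) :
    (b.length > pvWsSuf b) ↔ PySem.Chars.rstrip b ≠ [] := by
  rw [← pv_flush_eq]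
  constructor
  · intro h hnil
    have := congrArg List.length hnil
    simp [List.length_take] at this
    omega
  · intro h
    by_contra hle
    have : b.length - pvWsSuf b = 0 := by omega
    simp [this] at h

theorem pv_wsSuf_append_ws (b : List Char) (c : Char) (h : PySem.Chars.isspace c = true) :
    pvWsSuf (b ++ [c]) = pvWsSuf b + 1 := by
  simp [pvWsSuf, h]

theorem pv_wsSuf_append_nws (b : List Char) (c : Char) (h : PySem.Chars.isspace c = false) :
    pvWsSuf (b ++ [c]) = 0 := by
  simp [pvWsSuf, h]

theorem pv_lstrip_append (b : List Char) (c : Char)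
    (hb : b.dropWhile PySem.Chars.isspace = b)
    (h : b ≠ [] ∨ PySem.Chars.isspace c = false) :
    (b ++ [c]).dropWhile PySem.Chars.isspace = b ++ [c] := by
  cases b with
  | nil =>
    rcases h with h | h
    · exact absurd rfl h
    · simp [h]
  | cons x xs =>
    have hx : PySem.Chars.isspace x = false := by
      by_contra hx
      have hx' : PySem.Chars.isspace x = true := by
        revert hx; cases PySem.Chars.isspace x <;> simp
      simp only [List.dropWhile_cons, hx', if_pos] at hb
      have := congrArg List.length hb
      have hle := List.length_dropWhile_le (p := PySem.Chars.isspace) (l := xs)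
      simp at this
      omega
    simp [hx]

theorem pv_strip_cons_ws (c : Char) (x : List Char) (h : PySem.Chars.isspace c = true) :
    PySem.Chars.strip (c :: x) = PySem.Chars.strip x := by
  simp [PySem.Chars.strip, PySem.Chars.lstrip, h]

theorem pv_strip_of_lstripped (b : List Char) (hb : b.dropWhile PySem.Chars.isspace = b) :
    PySem.Chars.strip b = PySem.Chars.rstrip b := by
  simp [PySem.Chars.strip, PySem.Chars.lstrip, hb]

-- flushing the buffer emits exactly the stripped piece (when non-empty)
theorem pv_flush_emit (numbers : List String) (b : List Char)
    (hb : b.dropWhile PySem.Chars.isspace = b) :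
    (if b.length > pvWsSuf b then numbers ++ [String.ofList (b.take (b.length - pvWsSuf b))]
     else numbers) = numbers ++ pvEmit [b] := by
  rw [pv_flush_eq]
  by_cases h : b.length > pvWsSuf b
  · have hne : PySem.Chars.rstrip b ≠ [] := (pv_flush_pos b).1 h
    have hst : PySem.Chars.strip b = PySem.Chars.rstrip b := pv_strip_of_lstripped b hb
    simp [h, pvEmit, hst, hne]
  · have : ¬ PySem.Chars.rstrip b ≠ [] := fun hc => h ((pv_flush_pos b).2 hc)
    have hnil : PySem.Chars.rstrip b = [] := by tauto
    have hst : PySem.Chars.strip b = [] := by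
      rw [pv_strip_of_lstripped b hb, hnil]
    simp [h, pvEmit, hst]

-- the main invariant of the scan
theorem pvAltLoop_spec (l : List Char) (numbers : List String) (buf : List Char)
    (hb : buf.dropWhile PySem.Chars.isspace = buf) :
    pvAltLoop numbers buf (pvWsSuf buf) l
      = numbers ++ pvEmit ((pvSplit2 l).modifyHead (buf ++ ·)) := by
  induction l generalizing numbers buf with
  | nil =>
    simp only [pvAltLoop, pvSplit2, List.modifyHead, List.append_nil]
    exact pv_flush_emit numbers buf hb
  | cons c t ih =>
    cases hs : pvSplit2 t with
    | nil => exact absurd hs (pvSplit2_ne_nil t)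
    | cons x xs =>
    by_cases hd : c = ',' ∨ c = '\n'
    · simp only [pvAltLoop, if_pos hd]
      rw [show (0 : Nat) = pvWsSuf ([] : List Char) from rfl,
        ih _ [] rfl, pv_flush_emit numbers buf hb]
      simp only [pvSplit2, if_pos hd, hs]
      simp [pvEmit, List.append_assoc]
    · simp only [pvAltLoop, if_neg hd]
      by_cases hws : PySem.Chars.isspace c = true
      · rw [if_pos hws]
        by_cases hbe : buf = []
        · subst hbe
          rw [if_neg (by simp)]
          rw [ih numbers [] rfl]
          simp only [pvSplit2, if_neg hd, hs]
          simp [pvEmit, pv_strip_cons_ws c x hws]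
        · rw [if_pos (by simpa using hbe)]
          rw [← pv_wsSuf_append_ws buf c hws,
            ih numbers (buf ++ [c]) (pv_lstrip_append buf c hb (Or.inl hbe))]
          simp only [pvSplit2, if_neg hd, hs]
          simp
      · have hws' : PySem.Chars.isspace c = false := by
          revert hws; cases PySem.Chars.isspace c <;> simp
        rw [if_neg (by simp [hws'])]
        rw [← pv_wsSuf_append_nws buf c hws',
          ih numbers (buf ++ [c]) (pv_lstrip_append buf c hb (Or.inr hws'))]
        simp only [pvSplit2, if_neg hd, hs]
        simp

theorem pv_alt_canon (s : String) (hs : s ≠ "") :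
    parse_phone_numbers_from_input_alt s = pvEmit (pvSplit2 s.toList) := by
  unfold parse_phone_numbers_from_input_alt
  rw [if_neg hs]
  have := pvAltLoop_spec s.toList [] [] rfl
  rw [show (0 : Nat) = pvWsSuf [] from rfl, this, pv_modifyHead_nil_append]
  simp

theorem pv_a_canon (s : String) (hs : s ≠ "") :
    parse_phone_numbers_from_input s = pvEmit (pvSplit2 s.toList) := by
  unfold parse_phone_numbers_from_input
  rw [if_neg hs]
  simp only [PySem.Str.split?, PySem.Chars.split?]
  norm_num
  have h1 : ("\n" : String).toList = ['\n'] := rfl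
  have h2 : ("," : String).toList = [','] := rfl
  simp only [h1, h2, splitOn_single,
    if_neg (by decide : ¬("," : String) = ""), if_neg (by decide : ¬("\n" : String) = "")]
  simp only [pv_foldl_strip, PySem.List.foldl_append_eq_flatMap, List.nil_append]
  rw [pvSplit2_eq_flatMap]
  simp only [Option.map_some, Option.getD_some, List.flatMap_map, List.map_map]
  rw [pvEmit_flatMap]
  congr 1
  funext p
  rw [pvEmit_eq_filter]
  congr 2
  · funext q
    simp [PySem.Str.strip]
  · simp

theorem pv_ports_agree (s : String) :
    parse_phone_numbers_from_input s = parse_phone_numbers_from_input_alt s := by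
  by_cases hs : s = ""
  · subst hs; rfl
  · rw [pv_a_canon s hs, pv_alt_canon s hs]

-- ===== VERDICT (by name: the statement is the Claim_ definition above) =====
theorem parse_phone_numbers_from_input_spec : Claim_equal_parse_phone_numbers_from_input := by
  intro s _
  unfold Spec_parse_phone_numbers_from_input
  exact pv_ports_agree s
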